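-- pv_equiv track=rewrite | github.com/Dexdezdes/COMP0016_2026_Team14_AvatarForms | Backend/formatting.py | match_mcq_option
-- ===== SOURCE A (Python) =====
-- def match_mcq_option(answer, options):
--     """Try to match a free-text answer to one of the MCQ options.
--
--     Uses case-insensitive substring matching. Returns the best-matching
--     option text, or the original answer if no match is found.
--     """
--     answer_lower = answer.strip().lower()
--
--     # Exact match (case-insensitive)
--     for opt in options:
--         if opt.lower() == answer_lower:
--             return opt
--
--     # Substring match: option text found in the answer
--     for opt in options:
--         if opt.lower() in answer_lower:
--             return opt
--
--     # Substring match: answer found in option text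
--     for opt in options:
--         if answer_lower in opt.lower():
--             return opt
--
--     # No match found, return original answer
--     return answer
-- ===== SOURCE B (Python) =====
-- def match_mcq_option(answer, options):
--     """Single-pass rank-based rewrite: rank each option once (0 exact, 1
--     option-in-answer, 2 answer-in-option, 3 no match) and keep the first
--     option with the lowest rank; return it if its rank < 3, else the answer."""
--     answer_lower = answer.strip().lower()
--     best_rank, best_opt = 3, answer
--     for opt in options:
--         opt_lower = opt.lower()
--         if opt_lower == answer_lower:
--             rank = 0
--         elif opt_lower in answer_lower:
--             rank = 1
--         elif answer_lower in opt_lower: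
--             rank = 2
--         else:
--             rank = 3
--         if rank < best_rank:
--             best_rank, best_opt = rank, opt
--     return best_opt if best_rank < 3 else answer
-- ===== Notes on version B (the rewrite author's own statement) =====
-- stated objective: simpler
-- what changed: Replaces A's three sequential full scans of the options (exact, option-in-answer, answer-in-option) by one single pass that ranks every option once and keeps the first option of the lowest rank.
import Mathlib
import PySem

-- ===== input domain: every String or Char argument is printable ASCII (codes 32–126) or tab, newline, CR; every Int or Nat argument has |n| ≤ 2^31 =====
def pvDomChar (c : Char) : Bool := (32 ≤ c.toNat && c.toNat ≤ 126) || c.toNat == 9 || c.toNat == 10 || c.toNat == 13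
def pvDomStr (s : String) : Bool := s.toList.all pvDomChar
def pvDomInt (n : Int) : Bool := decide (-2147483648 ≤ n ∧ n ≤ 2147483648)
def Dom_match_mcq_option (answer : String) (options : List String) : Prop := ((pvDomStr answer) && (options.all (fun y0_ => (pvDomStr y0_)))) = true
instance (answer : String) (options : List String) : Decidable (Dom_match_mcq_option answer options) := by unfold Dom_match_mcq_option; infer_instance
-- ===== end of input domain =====

-- B replaces A's three sequential scans of the options by one single-pass fold that
-- ranks each option once and keeps the first option of the lowest rank (objective: simpler).

-- ===== PORT A =====
-- Three loops with early return, each ported as find? over the options in order.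
def match_mcq_option (answer : String) (options : List String) : String :=
  let answer_lower := PySem.Str.lower (PySem.Str.strip answer)
  match options.find? (fun opt => PySem.Str.lower opt == answer_lower) with
  | some opt => opt
  | none =>
    match options.find? (fun opt => PySem.Str.isIn (PySem.Str.lower opt) answer_lower) with
    | some opt => opt
    | none =>
      match options.find? (fun opt => PySem.Str.isIn answer_lower (PySem.Str.lower opt)) with
      | some opt => opt
      | none => answer

-- ===== PORT B =====
-- rank of one option against the lowered answer: 0 exact, 1 opt⊆ans, 2 ans⊆opt, 3 none
def pvRank (al : String) (opt : String) : Nat :=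
  if PySem.Str.lower opt == al then 0
  else if PySem.Str.isIn (PySem.Str.lower opt) al then 1
  else if PySem.Str.isIn al (PySem.Str.lower opt) then 2
  else 3

def match_mcq_option_alt (answer : String) (options : List String) : String :=
  let answer_lower := PySem.Str.lower (PySem.Str.strip answer)
  let best := options.foldl
    (fun (b : Nat × String) opt =>
      let r := pvRank answer_lower opt
      if r < b.1 then (r, opt) else b)
    (3, answer)
  if best.1 < 3 then best.2 else answer

-- ===== PRECONDITION & SPEC =====
def Spec_match_mcq_option (answer : String) (options : List String) (out : String) : Prop := out = match_mcq_option_alt answer options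
instance (answer : String) (options : List String) (out : String) : Decidable (Spec_match_mcq_option answer options out) := by unfold Spec_match_mcq_option; infer_instance

-- ===== CLAIM (what is proved, stated in full; the proofs are below) =====
def Claim_equal_match_mcq_option : Prop := ∀ (answer : String) (options : List String), Dom_match_mcq_option answer options → Spec_match_mcq_option answer options (match_mcq_option answer options)

-- ===== LEMMAS AND PROOFS =====

-- the fold step of B
def pvStep (al : String) (b : Nat × String) (opt : String) : Nat × String :=
  if pvRank al opt < b.1 then (pvRank al opt, opt) else b

theorem pvRank_cases (al o : String) :
    pvRank al o = 0 ∨ pvRank al o = 1 ∧ (PySem.Str.lower o == al) = false ∨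
    pvRank al o = 2 ∧ (PySem.Str.lower o == al) = false ∨
    pvRank al o = 3 ∧ (PySem.Str.lower o == al) = false := by
  unfold pvRank; split_ifs with h1 h2 h3 <;> simp_all

theorem pvRank_eq_zero_iff (al o : String) :
    pvRank al o = 0 ↔ (PySem.Str.lower o == al) = true := by
  unfold pvRank; split_ifs <;> simp_all

theorem pvRank_eq_one_iff (al o : String) (h : (PySem.Str.lower o == al) = false) :
    (pvRank al o == 1) = PySem.Str.isIn (PySem.Str.lower o) al := by
  unfold pvRank; split_ifs <;> simp_all

theorem pvRank_eq_two_iff (al o : String) (h : (PySem.Str.lower o == al) = false)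
    (h1 : pvRank al o ≠ 1) :
    (pvRank al o == 2) = PySem.Str.isIn al (PySem.Str.lower o) := by
  unfold pvRank at *; split_ifs at * <;> simp_all

theorem find?_congr_mem {α : Type} (p q : α → Bool) :
    ∀ (l : List α), (∀ x ∈ l, p x = q x) → l.find? p = l.find? q := by
  intro l hl
  induction l with
  | nil => rfl
  | cons a t ih =>
    have ha := hl a (by simp)
    by_cases h : p a = true
    · rw [List.find?_cons_of_pos h, List.find?_cons_of_pos (ha ▸ h)]
    · rw [List.find?_cons_of_neg (by simpa using h),
        List.find?_cons_of_neg (by simp [← ha]; simpa using h)]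
      exact ih (fun x hx => hl x (by simp [hx]))

-- characterization of the fold from each possible accumulator rank
theorem fold0 (al : String) : ∀ (opts : List String) (s : String),
    opts.foldl (pvStep al) (0, s) = (0, s) := by
  intro opts
  induction opts with
  | nil => intro s; rfl
  | cons o t ih => intro s; simp only [List.foldl_cons, pvStep]; simp [ih]

theorem fold1 (al : String) : ∀ (opts : List String) (s : String),
    opts.foldl (pvStep al) (1, s) =
      match opts.find? (fun o => pvRank al o == 0) with
      | some o => (0, o)
      | none => (1, s) := by
  intro opts
  induction opts with
  | nil => intro s; rfl
  | cons o t ih =>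
    intro s
    rcases pvRank_cases al o with h | ⟨h, _⟩ | ⟨h, _⟩ | ⟨h, _⟩ <;>
      simp [List.foldl_cons, pvStep, h, fold0, ih]

theorem fold2 (al : String) : ∀ (opts : List String) (s : String),
    opts.foldl (pvStep al) (2, s) =
      match opts.find? (fun o => pvRank al o == 0) with
      | some o => (0, o)
      | none =>
        match opts.find? (fun o => pvRank al o == 1) with
        | some o => (1, o)
        | none => (2, s) := by
  intro opts
  induction opts with
  | nil => intro s; rfl
  | cons o t ih =>
    intro s
    rcases pvRank_cases al o with h | ⟨h, _⟩ | ⟨h, _⟩ | ⟨h, _⟩ <;>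
      simp [List.foldl_cons, pvStep, h, fold0, fold1, ih]

theorem fold3 (al : String) : ∀ (opts : List String) (s : String),
    opts.foldl (pvStep al) (3, s) =
      match opts.find? (fun o => pvRank al o == 0) with
      | some o => (0, o)
      | none =>
        match opts.find? (fun o => pvRank al o == 1) with
        | some o => (1, o)
        | none =>
          match opts.find? (fun o => pvRank al o == 2) with
          | some o => (2, o)
          | none => (3, s) := by
  intro opts
  induction opts with
  | nil => intro s; rfl
  | cons o t ih =>
    intro s
    rcases pvRank_cases al o with h | ⟨h, _⟩ | ⟨h, _⟩ | ⟨h, _⟩ <;>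
      simp [List.foldl_cons, pvStep, h, fold0, fold1, fold2, ih]

-- ===== VERDICT (by name: the statement is the Claim_ definition above) =====
theorem match_mcq_option_spec : Claim_equal_match_mcq_option := by
  intro answer options _
  unfold Spec_match_mcq_option match_mcq_option match_mcq_option_alt
  dsimp only
  set al := PySem.Str.lower (PySem.Str.strip answer) with hal
  have hstep : (fun (b : Nat × String) opt =>
      let r := pvRank al opt
      if r < b.1 then (r, opt) else b) = pvStep al := by
    funext b o; rfl
  rw [hstep, fold3 al options answer]
  -- predicate of phase 1 equals (rank == 0)
  have h0eq : options.find? (fun o => pvRank al o == 0) =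
      options.find? (fun o => PySem.Str.lower o == al) := by
    apply find?_congr_mem
    intro o _
    cases hb : (PySem.Str.lower o == al) with
    | true => simp [(pvRank_eq_zero_iff al o).2 hb]
    | false =>
      have hne : pvRank al o ≠ 0 := fun hh => by simp [(pvRank_eq_zero_iff al o).1 hh] at hb
      simp [hne]
  rw [h0eq]
  rcases hf0 : options.find? (fun o => PySem.Str.lower o == al) with _ | o
  · -- no exact match anywhere
    have hno0 : ∀ o ∈ options, (PySem.Str.lower o == al) = false :=
      fun o ho => by simpa using List.find?_eq_none.mp hf0 o ho
    have h1eq : options.find? (fun o => pvRank al o == 1) =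
        options.find? (fun o => PySem.Str.isIn (PySem.Str.lower o) al) := by
      exact find?_congr_mem _ _ options (fun o ho => pvRank_eq_one_iff al o (hno0 o ho))
    rw [h1eq]
    rcases hf1 : options.find? (fun o => PySem.Str.isIn (PySem.Str.lower o) al) with _ | o
    · have hno1 : ∀ o ∈ options, pvRank al o ≠ 1 := by
        intro o ho h
        have := List.find?_eq_none.mp hf1 o ho
        rw [← pvRank_eq_one_iff al o (hno0 o ho)] at this
        simp [h] at this
      have h2eq : options.find? (fun o => pvRank al o == 2) =
          options.find? (fun o => PySem.Str.isIn al (PySem.Str.lower o)) := by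
        exact find?_congr_mem _ _ options
          (fun o ho => pvRank_eq_two_iff al o (hno0 o ho) (hno1 o ho))
      rw [h2eq]
      rcases hf2 : options.find? (fun o => PySem.Str.isIn al (PySem.Str.lower o)) with _ | o <;> simp
    · simp
  · simp
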